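-- pv_equiv track=rewrite | github.com/AlifSrSE/ProblemSolves | 1362F-johnnyAndMegansNecklace.py | highest_power_of_two
-- ===== SOURCE A (Python) =====
-- def highest_power_of_two(x):
--     if x == 0:
--         return 20
--     k = 0
--     while x % 2 == 0:
--         x //= 2
--         k += 1
--     return k
-- ===== SOURCE B (Python) =====
-- def highest_power_of_two(x):
--     if x == 0:
--         return 20
--     return (x & -x).bit_length() - 1
-- ===== Notes on version B (the rewrite author's own statement) =====
-- stated objective: simpler
-- what changed: Replaces the divide-by-2 while loop with the closed-form bit trick: x & -x isolates the lowest set bit, whose bit_length minus 1 is the count of trailing factors of two.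
import Mathlib
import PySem

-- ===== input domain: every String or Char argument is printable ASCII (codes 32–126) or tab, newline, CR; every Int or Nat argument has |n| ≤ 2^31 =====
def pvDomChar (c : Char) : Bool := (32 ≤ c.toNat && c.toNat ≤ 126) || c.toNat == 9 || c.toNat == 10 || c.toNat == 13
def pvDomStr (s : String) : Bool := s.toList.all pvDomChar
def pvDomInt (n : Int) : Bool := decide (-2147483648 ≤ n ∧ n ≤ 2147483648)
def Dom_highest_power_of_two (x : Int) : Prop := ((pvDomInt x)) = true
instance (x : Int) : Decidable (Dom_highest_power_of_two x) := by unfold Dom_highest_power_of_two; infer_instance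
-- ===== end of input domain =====

-- B replaces A's divide-by-2 while loop with the closed-form bit trick
-- (x & -x).bit_length() - 1, keeping the x == 0 special case; objective: simpler.

-- ===== PORT A =====
-- termination helper for A's while loop (cited by decreasing_by)
theorem hpot_floordiv_two_natAbs_lt (x : Int) (hx : x ≠ 0)
    (he : PySem.Int.mod x 2 = 0) : (PySem.Int.floordiv x 2).natAbs < x.natAbs := by
  obtain ⟨y, rfl⟩ := (PySem.Int.mod_eq_zero_iff_dvd x 2).mp he
  rw [PySem.Int.floordiv_eq_ediv_of_pos (by omega), Int.mul_ediv_cancel_left y (by omega)]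
  have : y ≠ 0 := by rintro rfl; simp at hx
  simp [Int.natAbs_mul]; omega

-- the 'x ≠ 0 ∧' conjunct is a totality guard only: A enters the loop only after the
-- x == 0 early return, so hpotLoop is never called with x = 0
def hpotLoop (x k : Int) : Int :=
  if h : x ≠ 0 ∧ PySem.Int.mod x 2 = 0 then
    hpotLoop (PySem.Int.floordiv x 2) (k + 1)
  else k
termination_by x.natAbs
decreasing_by exact hpot_floordiv_two_natAbs_lt x h.1 h.2

def highest_power_of_two (x : Int) : Int :=
  if x = 0 then 20 else hpotLoop x 0

-- ===== PORT B =====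
def highest_power_of_two_alt (x : Int) : Int :=
  if x = 0 then 20
  else (PySem.Int.bitLength (PySem.Int.band x (-x)) : Int) - 1

-- ===== PRECONDITION & SPEC =====
def Spec_highest_power_of_two (x : Int) (out : Int) : Prop := out = highest_power_of_two_alt x
instance (x : Int) (out : Int) : Decidable (Spec_highest_power_of_two x out) := by unfold Spec_highest_power_of_two; infer_instance

-- ===== CLAIM (what is proved, stated in full; the proofs are below) =====
def Claim_equal_highest_power_of_two : Prop := ∀ (x : Int), Dom_highest_power_of_two x → Spec_highest_power_of_two x (highest_power_of_two x)

-- ===== LEMMAS AND PROOFS =====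

-- (2m+1) &&& 2k = 2 (m &&& k) on Nat
theorem hpot_and_odd_even (m k : Nat) : (2 * m + 1) &&& (2 * k) = 2 * (m &&& k) := by
  apply Nat.eq_of_testBit_eq
  intro i
  cases i with
  | zero =>
      simp [Nat.testBit_zero]
  | succ j =>
      rw [Nat.testBit_and, Nat.testBit_add_one, Nat.testBit_add_one, Nat.testBit_add_one]
      have h1 : (2 * m + 1) / 2 = m := by omega
      have h2 : 2 * k / 2 = k := by omega
      have h3 : 2 * (m &&& k) / 2 = m &&& k := by omega
      rw [h1, h2, h3, Nat.testBit_and]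

-- 2m &&& (2k+1) = 2 (m &&& k) on Nat
theorem hpot_and_even_odd (m k : Nat) : (2 * m) &&& (2 * k + 1) = 2 * (m &&& k) := by
  apply Nat.eq_of_testBit_eq
  intro i
  cases i with
  | zero =>
      simp [Nat.testBit_zero]
  | succ j =>
      rw [Nat.testBit_and, Nat.testBit_add_one, Nat.testBit_add_one, Nat.testBit_add_one]
      have h1 : (2 * k + 1) / 2 = k := by omega
      have h2 : 2 * m / 2 = m := by omega
      have h3 : 2 * (m &&& k) / 2 = m &&& k := by omega
      rw [h1, h2, h3, Nat.testBit_and]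

-- clearing the lowest set bit: n &&& (n-1) = n - 2^t when 2^t exactly divides n
theorem hpot_and_pred (n : Nat) : ∀ t : Nat, 0 < n → 2 ^ t ∣ n → ¬ 2 ^ (t + 1) ∣ n →
    n &&& (n - 1) = n - 2 ^ t := by
  induction n using Nat.strong_induction_on with
  | _ n ih =>
    intro t hn hd hnd
    rcases Nat.even_or_odd n with he | ho
    · -- n even: n = 2m, and t ≥ 1
      obtain ⟨m, hm⟩ := he
      have hm2 : n = 2 * m := by omega
      have hmpos : 0 < m := by omega
      cases t with
      | zero =>
          have : (2 : Nat) ∣ n := ⟨m, by omega⟩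
          simp at hnd
          omega
      | succ s =>
          have hds : 2 ^ s ∣ m := by
            obtain ⟨c, hc⟩ := hd
            have h2c : n = 2 * (2 ^ s * c) := by rw [hc]; ring
            exact ⟨c, by omega⟩
          have hnds : ¬ 2 ^ (s + 1) ∣ m := by
            intro ⟨c, hc⟩
            exact hnd ⟨c, by rw [hm2, hc]; ring⟩
          have hlt : m < n := by omega
          have ihm := ih m hlt s hmpos hds hnds
          have hsub : n - 1 = 2 * (m - 1) + 1 := by omega
          have hle : 2 ^ s ≤ m := Nat.le_of_dvd hmpos hds
          calc n &&& (n - 1) = (2 * m) &&& (2 * (m - 1) + 1) := by rw [← hm2, ← hsub]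
            _ = 2 * (m &&& (m - 1)) := hpot_and_even_odd m (m - 1)
            _ = 2 * (m - 2 ^ s) := by rw [ihm]
            _ = n - 2 ^ (s + 1) := by rw [hm2]; rw [pow_succ]; omega
    · -- n odd: t = 0 and n &&& (n-1) = n - 1
      obtain ⟨m, hm⟩ := ho
      have ht : t = 0 := by
        by_contra h
        have : 2 ∣ n := dvd_trans (dvd_pow_self 2 h) hd
        omega
      subst ht
      have hsub : n - 1 = 2 * m := by omega
      calc n &&& (n - 1) = (2 * m + 1) &&& (2 * m) := by rw [← hm, ← hsub]
        _ = 2 * (m &&& m) := hpot_and_odd_even m m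
        _ = n - 2 ^ 0 := by simp [Nat.and_self]; omega

-- Python's x & -x on a nonzero int isolates the lowest set bit: it equals 2^t
-- where 2^t exactly divides x
theorem hpot_band_neg (x : Int) (t : Nat) (hx : x ≠ 0)
    (hd : (2 ^ t : Int) ∣ x) (hnd : ¬ (2 ^ (t + 1) : Int) ∣ x) :
    PySem.Int.band x (-x) = (2 ^ t : Int) := by
  -- reduce to the Nat statement about n = |x|
  set n : Nat := x.natAbs with hn
  have hnpos : 0 < n := by simpa [hn] using Int.natAbs_pos.mpr hx
  have hdn : 2 ^ t ∣ n := by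
    have := Int.natAbs_dvd_natAbs.mpr hd
    simpa [Int.natAbs_pow] using this
  have hndn : ¬ 2 ^ (t + 1) ∣ n := by
    intro h
    exact hnd (by simpa [Int.natAbs_pow] using Int.natAbs_dvd_natAbs.mp (by simpa [Int.natAbs_pow] using h))
  have key : n &&& (n - 1) = n - 2 ^ t := hpot_and_pred n t hnpos hdn hndn
  have hle : 2 ^ t ≤ n := Nat.le_of_dvd hnpos hdn
  rcases lt_trichotomy x 0 with hneg | hzero | hpos
  · -- x < 0: band picks the branch ↑((-x).toNat - ((-x).toNat &&& (-x - 1).toNat))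
    have hb : PySem.Int.band x (-x) = ((( -x).toNat - ((-x).toNat &&& (-x - 1).toNat) : Nat) : Int) := by
      unfold PySem.Int.band
      rw [if_neg (by omega), if_pos (by omega)]
    have htn : (-x).toNat = n := by omega
    have htn1 : (-x - 1).toNat = n - 1 := by omega
    rw [hb, htn, htn1, key, Nat.sub_sub_self hle]
    push_cast
    ring
  · exact absurd hzero hx
  · -- x > 0: band picks the branch ↑(x.toNat - (x.toNat &&& (-(-x) - 1).toNat))
    have hb : PySem.Int.band x (-x) = ((x.toNat - (x.toNat &&& (-(-x) - 1).toNat) : Nat) : Int) := by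
      unfold PySem.Int.band
      rw [if_pos (by omega), if_neg (by omega)]
    have htn : x.toNat = n := by omega
    have htn1 : (-(-x) - 1).toNat = n - 1 := by omega
    rw [hb, htn, htn1, key, Nat.sub_sub_self hle]
    push_cast
    ring

-- bit_length of 2^t is t+1
theorem hpot_bitLength_pow (t : Nat) : PySem.Int.bitLength ((2 : Int) ^ t) = t + 1 := by
  have hne : ((2 : Int) ^ t) ≠ 0 := by positivity
  have h1 : ((2 : Int) ^ t).natAbs < 2 ^ PySem.Int.bitLength ((2 : Int) ^ t) :=
    PySem.Int.lt_two_pow_bitLength _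
  have h2 : 2 ^ (PySem.Int.bitLength ((2 : Int) ^ t) - 1) ≤ ((2 : Int) ^ t).natAbs :=
    PySem.Int.two_pow_bitLength_le _ hne
  have habs : ((2 : Int) ^ t).natAbs = 2 ^ t := by simp [Int.natAbs_pow]
  rw [habs] at h1 h2
  have l1 : t < PySem.Int.bitLength ((2 : Int) ^ t) :=
    (Nat.pow_lt_pow_iff_right (by omega)).mp h1
  have l2 : PySem.Int.bitLength ((2 : Int) ^ t) - 1 ≤ t :=
    (Nat.pow_le_pow_iff_right (by omega)).mp h2
  omega

-- A's while loop adds to k the exact multiplicity of 2 in x (bounded induction on |x|)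
theorem hpot_loop_aux : ∀ (n : Nat) (x : Int), x.natAbs ≤ n → x ≠ 0 →
    ∀ k : Int, ∃ t : Nat, hpotLoop x k = k + t ∧ (2 ^ t : Int) ∣ x ∧ ¬ (2 ^ (t + 1) : Int) ∣ x := by
  intro n
  induction n with
  | zero => intro x hle hx k; exact absurd (by omega : x = 0) hx
  | succ n ih =>
    intro x hle hx k
    by_cases he : PySem.Int.mod x 2 = 0
    · -- even step
      have hd2 : (2 : Int) ∣ x := (PySem.Int.mod_eq_zero_iff_dvd x 2).mp he
      obtain ⟨y, rfl⟩ := hd2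
      have hy : y ≠ 0 := by rintro rfl; simp at hx
      have hfd : PySem.Int.floordiv (2 * y) 2 = y := by
        rw [PySem.Int.floordiv_eq_ediv_of_pos (by omega), Int.mul_ediv_cancel_left y (by omega)]
      have hyle : y.natAbs ≤ n := by simp [Int.natAbs_mul] at hle; omega
      obtain ⟨t, h1, h2, h3⟩ := ih y hyle hy (k + 1)
      refine ⟨t + 1, ?_, ⟨?_, ?_⟩⟩
      · rw [hpotLoop, dif_pos ⟨hx, he⟩, hfd, h1]; push_cast; ring
      · obtain ⟨c, hc⟩ := h2
        exact ⟨c, by rw [hc]; ring⟩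
      · rintro ⟨c, hc⟩
        refine h3 ⟨c, ?_⟩
        have h2c : 2 * y = 2 * (2 ^ (t + 1) * c) := by rw [hc]; ring
        omega
    · -- odd: loop exits, t = 0
      refine ⟨0, ?_, ⟨one_dvd x, ?_⟩⟩
      · rw [hpotLoop, dif_neg (by tauto)]; simp
      · intro hd
        exact he ((PySem.Int.mod_eq_zero_iff_dvd x 2).mpr (by simpa using hd))

theorem hpot_loop_spec (x : Int) (hx : x ≠ 0) :
    ∀ k : Int, ∃ t : Nat, hpotLoop x k = k + t ∧ (2 ^ t : Int) ∣ x ∧ ¬ (2 ^ (t + 1) : Int) ∣ x :=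
  hpot_loop_aux x.natAbs x le_rfl hx

-- ===== VERDICT (by name: the statement is the Claim_ definition above) =====
theorem highest_power_of_two_spec : Claim_equal_highest_power_of_two := by
  intro x _
  unfold Spec_highest_power_of_two highest_power_of_two highest_power_of_two_alt
  by_cases hx : x = 0
  · simp [hx]
  · rw [if_neg hx, if_neg hx]
    obtain ⟨t, h1, h2, h3⟩ := hpot_loop_spec x hx 0
    rw [h1, hpot_band_neg x t hx h2 h3, hpot_bitLength_pow t]
    push_cast
    ring
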